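-- pv_equiv track=rewrite | github.com/Alteztyn/TBA---Assignment | tbas_.py | isKeterangan
-- ===== SOURCE A (Python) =====
-- def isKeterangan(word: str) -> bool:
--     # Ket = {'dikantin', 'dikamar', 'dikelas', 'dilapangan', 'diatap'}
--     current_State_Q = 0
--     for letter in word:
--         match current_State_Q:
--             case -1: break
--             case 0: current_State_Q = 1 if letter == 'd' else -1
--             case 1: current_State_Q = 2 if letter == 'i' else -1
--             case 2:
--                 if letter == 'k': current_State_Q = 3
--                 elif letter == 'l': current_State_Q = 16
--                 elif letter == 'a': current_State_Q = 24
--                 else: current_State_Q = -1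
--             case 3:
--                 if letter == 'a': current_State_Q = 4
--                 elif letter == 'e': current_State_Q = 12
--                 else: current_State_Q = -1
--             case 4:
--                 if letter == 'm': current_State_Q = 9
--                 elif letter == 'n': current_State_Q = 5
--                 else: current_State_Q = -1
--             case 5: current_State_Q = 6 if letter == 't' else -1
--             case 6: current_State_Q = 7 if letter == 'i' else -1
--             case 7: current_State_Q = 8 if letter == 'n' else -1
--             case 8: current_State_Q = 8 if letter == ' ' else -1 #final state
--             # kamar
--             case 9: current_State_Q = 10 if letter == 'a' else -1
--             case 10: current_State_Q = 11 if letter == 'r' else -1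
--             case 11: current_State_Q = 11 if letter == ' ' else -1 #final state
--             #kelas
--             case 12: current_State_Q = 13 if letter == 'l' else -1
--             case 13: current_State_Q = 14 if letter == 'a' else -1
--             case 14: current_State_Q = 15 if letter == 's' else -1
--             case 15: current_State_Q = 15 if letter == ' ' else -1 #final state
--             #lapangan
--             case 16: current_State_Q = 17 if letter == 'a' else -1
--             case 17: current_State_Q = 18 if letter == 'p' else -1
--             case 18: current_State_Q = 19 if letter == 'a' else -1
--             case 19: current_State_Q = 20 if letter == 'n' else -1
--             case 20: current_State_Q = 21 if letter == 'g' else -1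
--             case 21: current_State_Q = 22 if letter == 'a' else -1
--             case 22: current_State_Q = 23 if letter == 'n' else -1
--             case 23: current_State_Q = 23 if letter == ' ' else -1 #final state
--             #atap
--             case 24: current_State_Q = 25 if letter == 't' else -1
--             case 25: current_State_Q = 26 if letter == 'a' else -1
--             case 26: current_State_Q = 27 if letter == 'p' else -1
--             case 27: current_State_Q = 27 if letter == ' ' else -1 #Final state
--     return current_State_Q == 8 or current_State_Q == 11 or current_State_Q == 15 or current_State_Q == 23 or current_State_Q == 27
-- ===== SOURCE B (Python) =====
-- KET = {'dikantin', 'dikamar', 'dikelas', 'dilapangan', 'diatap'}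
--
-- def isKeterangan(word: str) -> bool:
--     # strip ONLY trailing spaces (the DFA's final states loop on ' '), then set membership
--     return word.rstrip(' ') in KET
-- ===== Notes on version B (the rewrite author's own statement) =====
-- stated objective: simpler
-- what changed: Replaces the 29-state hand-coded DFA loop with a single rstrip(' ') plus membership in the literal 5-keyword set.
import Mathlib
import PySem

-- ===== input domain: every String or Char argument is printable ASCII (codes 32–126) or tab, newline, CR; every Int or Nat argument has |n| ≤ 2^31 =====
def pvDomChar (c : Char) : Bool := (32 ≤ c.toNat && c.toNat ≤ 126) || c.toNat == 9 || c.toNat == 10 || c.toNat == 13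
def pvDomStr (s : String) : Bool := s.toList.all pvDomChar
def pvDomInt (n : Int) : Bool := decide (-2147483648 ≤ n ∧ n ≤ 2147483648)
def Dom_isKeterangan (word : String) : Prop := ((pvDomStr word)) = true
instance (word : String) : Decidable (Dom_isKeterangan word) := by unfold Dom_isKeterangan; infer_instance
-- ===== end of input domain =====

-- B replaces A's 29-state hand-coded DFA loop by rstrip(' ') + membership in the 5-keyword set (simpler).

-- ===== PORT A =====
-- one loop iteration of A's match statement; Python's `case -1: break` ends the loop with the
-- state still -1 (and pvStep (-1) c = -1 thereafter), so folding over the rest is the same result;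
-- a state matching no case leaves the state unchanged (Python match falls through doing nothing).
def pvStep (q : Int) (c : Char) : Int :=
  if q = -1 then -1
  else if q = 0 then (if c = 'd' then 1 else -1)
  else if q = 1 then (if c = 'i' then 2 else -1)
  else if q = 2 then (if c = 'k' then 3 else if c = 'l' then 16 else if c = 'a' then 24 else -1)
  else if q = 3 then (if c = 'a' then 4 else if c = 'e' then 12 else -1)
  else if q = 4 then (if c = 'm' then 9 else if c = 'n' then 5 else -1)
  else if q = 5 then (if c = 't' then 6 else -1)
  else if q = 6 then (if c = 'i' then 7 else -1)
  else if q = 7 then (if c = 'n' then 8 else -1)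
  else if q = 8 then (if c = ' ' then 8 else -1)
  else if q = 9 then (if c = 'a' then 10 else -1)
  else if q = 10 then (if c = 'r' then 11 else -1)
  else if q = 11 then (if c = ' ' then 11 else -1)
  else if q = 12 then (if c = 'l' then 13 else -1)
  else if q = 13 then (if c = 'a' then 14 else -1)
  else if q = 14 then (if c = 's' then 15 else -1)
  else if q = 15 then (if c = ' ' then 15 else -1)
  else if q = 16 then (if c = 'a' then 17 else -1)
  else if q = 17 then (if c = 'p' then 18 else -1)
  else if q = 18 then (if c = 'a' then 19 else -1)
  else if q = 19 then (if c = 'n' then 20 else -1)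
  else if q = 20 then (if c = 'g' then 21 else -1)
  else if q = 21 then (if c = 'a' then 22 else -1)
  else if q = 22 then (if c = 'n' then 23 else -1)
  else if q = 23 then (if c = ' ' then 23 else -1)
  else if q = 24 then (if c = 't' then 25 else -1)
  else if q = 25 then (if c = 'a' then 26 else -1)
  else if q = 26 then (if c = 'p' then 27 else -1)
  else if q = 27 then (if c = ' ' then 27 else -1)
  else q

def isKeterangan (word : String) : Bool :=
  let q := word.toList.foldl pvStep 0
  q == 8 || q == 11 || q == 15 || q == 23 || q == 27

-- ===== PORT B =====
-- exact hand port of Python's str.rstrip(' ') (strip ONLY the space character from the right)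
def pvRstripSp (l : List Char) : List Char := (l.reverse.dropWhile (fun c => c == ' ')).reverse

def pvKws : List (List Char) :=
  ["dikantin".toList, "dikamar".toList, "dikelas".toList, "dilapangan".toList, "diatap".toList]

def isKeterangan_alt (word : String) : Bool := pvKws.contains (pvRstripSp word.toList)

-- ===== PRECONDITION & SPEC =====
def Spec_isKeterangan (word : String) (out : Bool) : Prop := out = isKeterangan_alt word
instance (word : String) (out : Bool) : Decidable (Spec_isKeterangan word out) := by unfold Spec_isKeterangan; infer_instance

-- ===== CLAIM (what is proved, stated in full; the proofs are below) =====
def Claim_equal_isKeterangan : Prop := ∀ (word : String), Dom_isKeterangan word → Spec_isKeterangan word (isKeterangan word)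

-- ===== LEMMAS AND PROOFS =====

-- all 28 reachable non-dead DFA states, keyed by the unique spaceless word reaching them
def pvTable : List (List Char × Int) :=
  [([], 0),
   (['d'], 1),
   (['d', 'i'], 2),
   (['d', 'i', 'k'], 3),
   (['d', 'i', 'k', 'a'], 4),
   (['d', 'i', 'k', 'a', 'n'], 5),
   (['d', 'i', 'k', 'a', 'n', 't'], 6),
   (['d', 'i', 'k', 'a', 'n', 't', 'i'], 7),
   (['d', 'i', 'k', 'a', 'n', 't', 'i', 'n'], 8),
   (['d', 'i', 'k', 'a', 'm'], 9),
   (['d', 'i', 'k', 'a', 'm', 'a'], 10),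
   (['d', 'i', 'k', 'a', 'm', 'a', 'r'], 11),
   (['d', 'i', 'k', 'e'], 12),
   (['d', 'i', 'k', 'e', 'l'], 13),
   (['d', 'i', 'k', 'e', 'l', 'a'], 14),
   (['d', 'i', 'k', 'e', 'l', 'a', 's'], 15),
   (['d', 'i', 'l'], 16),
   (['d', 'i', 'l', 'a'], 17),
   (['d', 'i', 'l', 'a', 'p'], 18),
   (['d', 'i', 'l', 'a', 'p', 'a'], 19),
   (['d', 'i', 'l', 'a', 'p', 'a', 'n'], 20),
   (['d', 'i', 'l', 'a', 'p', 'a', 'n', 'g'], 21),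
   (['d', 'i', 'l', 'a', 'p', 'a', 'n', 'g', 'a'], 22),
   (['d', 'i', 'l', 'a', 'p', 'a', 'n', 'g', 'a', 'n'], 23),
   (['d', 'i', 'a'], 24),
   (['d', 'i', 'a', 't'], 25),
   (['d', 'i', 'a', 't', 'a'], 26),
   (['d', 'i', 'a', 't', 'a', 'p'], 27)]

def pvKwFinal : List (List Char × Int) :=
  [(['d', 'i', 'k', 'a', 'n', 't', 'i', 'n'], 8), (['d', 'i', 'k', 'a', 'm', 'a', 'r'], 11), (['d', 'i', 'k', 'e', 'l', 'a', 's'], 15), (['d', 'i', 'l', 'a', 'p', 'a', 'n', 'g', 'a', 'n'], 23), (['d', 'i', 'a', 't', 'a', 'p'], 27)]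
def pvLook : List (List Char × Int) → List Char → Int
  | [], _ => -1
  | (k, v) :: t, l => if k = l then v else pvLook t l

-- the exact state of A's DFA after reading l
def pvState (l : List Char) : Int :=
  if pvRstripSp l = l then pvLook pvTable l else pvLook pvKwFinal (pvRstripSp l)

theorem pvRstrip_space (l : List Char) : pvRstripSp (l ++ [' ']) = pvRstripSp l := by
  simp [pvRstripSp]

theorem pvRstrip_ne (l : List Char) (c : Char) (h : c ≠ ' ') : pvRstripSp (l ++ [c]) = l ++ [c] := by
  simp [pvRstripSp, h]

theorem pvRstrip_len (l : List Char) : (pvRstripSp l).length ≤ l.length := by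
  simpa [pvRstripSp] using List.length_dropWhile_le _ l.reverse

theorem pvRstrip_mem (l : List Char) (h : pvRstripSp l ≠ l) : ' ' ∈ l := by
  by_contra hm
  apply h
  unfold pvRstripSp
  rw [List.dropWhile_eq_self_iff.mpr, List.reverse_reverse]
  intro hl
  simp only [beq_iff_eq]
  intro he
  exact hm (by rw [← he]; exact List.mem_reverse.mp (List.getElem_mem _))

theorem pvLook_none (t : List (List Char × Int)) (l : List Char)
    (h : ∀ e ∈ t, e.1 ≠ l) : pvLook t l = -1 := by
  induction t with
  | nil => rfl
  | cons e t ih =>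
    obtain ⟨k, v⟩ := e
    simp only [pvLook]
    rw [if_neg (h (k, v) List.mem_cons_self), ih fun e he => h e (List.mem_cons_of_mem _ he)]

theorem pvTable_dropLast : ∀ e ∈ pvTable, e.1 = [] ∨ e.1.dropLast ∈ pvTable.map Prod.fst := by
  decide

theorem pvTable_nospaceKey : ∀ e ∈ pvTable, ' ' ∉ e.1 := by decide

theorem pvKwFinal_sub : ∀ e ∈ pvKwFinal, e.1 ∈ pvTable.map Prod.fst := by decide

theorem pvKws_sub_table : ∀ k ∈ pvKws, k ∈ pvTable.map Prod.fst := by decide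

theorem pvKws_sub_final : ∀ k ∈ pvKws, k ∈ pvKwFinal.map Prod.fst := by decide

-- a word containing a space reaches no table state
theorem pvTable_nospace (m : List Char) (h : ' ' ∈ m) : pvLook pvTable m = -1 := by
  apply pvLook_none
  intro e he heq
  exact pvTable_nospaceKey e he (heq ▸ h)

theorem pvT1 (l : List Char) : pvStep (pvLook pvTable l) ' ' = pvLook pvKwFinal l := by
  by_cases hm : ∃ e ∈ pvTable, e.1 = l
  · obtain ⟨e, he, rfl⟩ := hm
    fin_cases he <;> decide
  · push Not at hm
    rw [pvLook_none _ _ hm, pvLook_none]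
    · decide
    · intro e he
      obtain ⟨e', he', hk⟩ := List.mem_map.mp (pvKwFinal_sub e he)
      exact hk ▸ hm e' he'

theorem pvTspace (r : List Char) : pvStep (pvLook pvKwFinal r) ' ' = pvLook pvKwFinal r := by
  by_cases hm : ∃ e ∈ pvKwFinal, e.1 = r
  · obtain ⟨e, he, rfl⟩ := hm
    fin_cases he <;> decide
  · push Not at hm
    rw [pvLook_none _ _ hm]
    decide

theorem pvKw_step (r : List Char) (c : Char) (hc : c ≠ ' ') :
    pvStep (pvLook pvKwFinal r) c = -1 := by
  by_cases hm : ∃ e ∈ pvKwFinal, e.1 = r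
  · obtain ⟨e, he, rfl⟩ := hm
    fin_cases he <;> simp [pvLook, pvKwFinal, pvStep, hc]
  · push Not at hm
    rw [pvLook_none _ _ hm]
    simp [pvStep]

-- the characters that appear in any keyword, plus the space
def pvSpecial : List Char := ['d', 'i', 'k', 'a', 'n', 't', 'm', 'r', 'e', 'l', 's', 'p', 'g', ' ']

set_option maxRecDepth 4000 in
theorem pvKeyChars : ∀ e ∈ pvTable, ∀ x ∈ e.1, x ∈ pvSpecial := by
  intro e he
  fin_cases he <;> simp [pvSpecial]

theorem pvLook_nonspecial (m : List Char) (c : Char) (h : c ∉ pvSpecial) :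
    pvLook pvTable (m ++ [c]) = -1 := by
  apply pvLook_none
  intro e he heq
  exact h (pvKeyChars e he c (heq ▸ List.mem_append_right m (List.mem_singleton.mpr rfl)))

theorem pvStep_nonspecial (q : Int) (c : Char) (h : c ∉ pvSpecial) (h0 : 0 ≤ q) (h27 : q ≤ 27) :
    pvStep q c = -1 := by
  have hd : c ≠ 'd' := fun e => h (by rw [e]; decide)
  have hi : c ≠ 'i' := fun e => h (by rw [e]; decide)
  have hk : c ≠ 'k' := fun e => h (by rw [e]; decide)
  have ha : c ≠ 'a' := fun e => h (by rw [e]; decide)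
  have hn : c ≠ 'n' := fun e => h (by rw [e]; decide)
  have ht : c ≠ 't' := fun e => h (by rw [e]; decide)
  have hm : c ≠ 'm' := fun e => h (by rw [e]; decide)
  have hr : c ≠ 'r' := fun e => h (by rw [e]; decide)
  have he : c ≠ 'e' := fun e => h (by rw [e]; decide)
  have hl : c ≠ 'l' := fun e => h (by rw [e]; decide)
  have hs : c ≠ 's' := fun e => h (by rw [e]; decide)
  have hp : c ≠ 'p' := fun e => h (by rw [e]; decide)
  have hg : c ≠ 'g' := fun e => h (by rw [e]; decide)
  have hsp : c ≠ ' ' := fun e => h (by rw [e]; decide)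
  interval_cases q <;> simp [pvStep, hd, hi, hk, ha, hn, ht, hm, hr, he, hl, hs, hp, hg, hsp]

theorem pvT2 (l : List Char) (c : Char) (hc : c ≠ ' ') :
    pvStep (pvLook pvTable l) c = pvLook pvTable (l ++ [c]) := by
  by_cases hm : ∃ e ∈ pvTable, e.1 = l
  · obtain ⟨e, he, rfl⟩ := hm
    by_cases hs : c ∈ pvSpecial
    · fin_cases he <;> fin_cases hs <;> first | (exact absurd rfl hc) | decide
    · rw [pvLook_nonspecial _ _ hs, pvStep_nonspecial _ _ hs]
      · fin_cases he <;> decide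
      · fin_cases he <;> decide
  · push Not at hm
    rw [pvLook_none _ _ hm, pvLook_none]
    · simp [pvStep]
    · intro e he heq
      have hd : e.1.dropLast = l := by rw [heq]; simp
      rcases pvTable_dropLast e he with h0 | hmem
      · rw [h0] at heq; exact absurd heq.symm (by simp)
      · rw [hd] at hmem
        obtain ⟨e', he', hk⟩ := List.mem_map.mp hmem
        exact hm e' he' hk

theorem pvStep_state (l : List Char) (c : Char) : pvStep (pvState l) c = pvState (l ++ [c]) := by
  by_cases hc : c = ' '
  · subst hc
    have hne : pvRstripSp (l ++ [' ']) ≠ l ++ [' '] := by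
      intro h
      have h1 := pvRstrip_len l
      rw [pvRstrip_space] at h
      have h2 := congrArg List.length h
      simp at h2
      omega
    have hA : pvState (l ++ [' ']) = pvLook pvKwFinal (pvRstripSp l) := by
      rw [pvState, if_neg hne, pvRstrip_space]
    rw [hA]
    by_cases hr : pvRstripSp l = l
    · rw [pvState, if_pos hr, hr]
      exact pvT1 l
    · rw [pvState, if_neg hr]
      exact pvTspace (pvRstripSp l)
  · rw [show pvState (l ++ [c]) = pvLook pvTable (l ++ [c]) by
      rw [pvState, if_pos (pvRstrip_ne l c hc)]]
    by_cases hr : pvRstripSp l = l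
    · rw [pvState, if_pos hr]
      exact pvT2 l c hc
    · rw [pvState, if_neg hr]
      have hsp : ' ' ∈ l ++ [c] := List.mem_append_left _ (pvRstrip_mem l hr)
      rw [pvKw_step _ _ hc, pvTable_nospace _ hsp]

theorem pvFoldl_state (l : List Char) : l.foldl pvStep 0 = pvState l := by
  induction l using List.reverseRecOn with
  | nil => decide
  | append_singleton l c ih =>
    rw [List.foldl_append, List.foldl_cons, List.foldl_nil, ih, pvStep_state]

theorem pvContains_false (ks : List (List Char)) (l : List Char) (h : l ∉ ks) :
    ks.contains l = false := by
  simpa using h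

theorem pvFinal_contains (l : List Char) :
    ((pvState l == 8 || pvState l == 11 || pvState l == 15 || pvState l == 23 || pvState l == 27) : Bool)
      = pvKws.contains (pvRstripSp l) := by
  rw [pvState]
  by_cases hr : pvRstripSp l = l
  · rw [if_pos hr, hr]
    by_cases hm : ∃ e ∈ pvTable, e.1 = l
    · obtain ⟨e, he, rfl⟩ := hm
      fin_cases he <;> decide
    · push Not at hm
      rw [pvLook_none _ _ hm, pvContains_false]
      · decide
      · intro hk
        obtain ⟨e', he', hk'⟩ := List.mem_map.mp (pvKws_sub_table l hk)
        exact hm e' he' hk'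
  · rw [if_neg hr]
    by_cases hm : ∃ e ∈ pvKwFinal, e.1 = pvRstripSp l
    · obtain ⟨e, he, hre⟩ := hm
      rw [← hre]
      fin_cases he <;> decide
    · push Not at hm
      rw [pvLook_none _ _ hm, pvContains_false]
      · decide
      · intro hk
        obtain ⟨e', he', hk'⟩ := List.mem_map.mp (pvKws_sub_final _ hk)
        exact hm e' he' hk'

-- ===== VERDICT (by name: the statement is the Claim_ definition above) =====
theorem isKeterangan_spec : Claim_equal_isKeterangan := by
  intro word _
  unfold Spec_isKeterangan isKeterangan isKeterangan_alt
  rw [pvFoldl_state, pvFinal_contains]
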